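-- pv_equiv track=rewrite | github.com/pickleypickle/AOC2024 | Day02/Part2.py | trial_removal
-- ===== SOURCE A (Python) =====
-- def trial_removal(levels):
--     valid_levels_count = 0
--
--     # Iterate through each level
--     for level in levels:
--         # Check level validity without removal
--         if (calculate_validity(level)) == True:
--             valid_levels_count += 1
--             continue # Skip to next level
--
--         # Check level validity removing one value at a time
--         for i in range(len(level)):
--                 new_list = level[:i] + level[i+1:]
--                 if (calculate_validity(new_list)) == True:
--                     valid_levels_count += 1
--                     break # Break to next level
--
--     return valid_levels_count
--
-- def calculate_validity(list):
--     # Check all values increase or decrease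
--     if all(int(list[i]) < int(list[i + 1]) for i in range(len(list) - 1)) or \
--         all(int(list[i]) > int(list[i + 1]) for i in range(len(list) - 1)):
--
--         # Check sequential values differ by 1, 2, or 3
--         if all(abs(int(list[i]) - int(list[i + 1])) in [1, 2, 3] for i in range(len(list) - 1)):
--             return True
--     return False
-- ===== SOURCE B (Python) =====
-- def trial_removal(levels):
--     return sum(1 for lv in levels if fixable(lv, 1, 3) or fixable(lv, -3, -1))
--
-- def fixable(lv, lo, hi):
--     # Find the first adjacent step outside [lo, hi]; if none, lv is already safe.
--     # Otherwise only deleting one endpoint of that first bad step can repair lv.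
--     j = first_bad(lv, lo, hi)
--     if j is None:
--         return True
--     return first_bad(lv[:j] + lv[j+1:], lo, hi) is None or \
--         first_bad(lv[:j+1] + lv[j+2:], lo, hi) is None
--
-- def first_bad(lv, lo, hi):
--     for k in range(len(lv) - 1):
--         if not (lo <= lv[k+1] - lv[k] <= hi):
--             return k
--     return None
-- ===== Notes on version B (the rewrite author's own statement) =====
-- stated objective: faster
-- what changed: B replaces A's try-every-removal brute force by a first-violation repair: per direction it locates the first adjacent step outside the band in one scan and tests only the two removals (either endpoint of that step) that can possibly repair it, O(m) per level instead of A's O(m^2).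
import Mathlib
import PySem

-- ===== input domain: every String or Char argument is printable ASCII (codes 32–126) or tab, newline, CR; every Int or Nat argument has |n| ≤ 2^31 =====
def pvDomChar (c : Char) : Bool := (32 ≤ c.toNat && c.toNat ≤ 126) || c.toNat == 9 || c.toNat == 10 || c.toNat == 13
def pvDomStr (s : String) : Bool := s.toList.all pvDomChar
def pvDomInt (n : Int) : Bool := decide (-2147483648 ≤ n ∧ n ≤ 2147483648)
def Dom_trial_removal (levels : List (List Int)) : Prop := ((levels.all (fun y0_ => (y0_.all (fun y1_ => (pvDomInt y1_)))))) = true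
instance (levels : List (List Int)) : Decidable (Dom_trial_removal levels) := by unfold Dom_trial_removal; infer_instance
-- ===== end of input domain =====

-- B replaces A's try-every-removal brute force by a first-violation repair per direction:
-- one scan finds the first adjacent step outside the band, and only deleting one endpoint
-- of that step can repair the level, so two O(m) re-checks suffice (O(m) vs A's O(m^2) per level).

-- ===== PORT A =====
def calculate_validity (l : List Int) : Bool :=
  if ((PySem.List.pyRange 0 ((l.length : Int) - 1) 1).all fun i =>
        decide (PySem.List.pyGetD l i 0 < PySem.List.pyGetD l (i + 1) 0))
     || ((PySem.List.pyRange 0 ((l.length : Int) - 1) 1).all fun i =>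
        decide (PySem.List.pyGetD l i 0 > PySem.List.pyGetD l (i + 1) 0)) then
    if (PySem.List.pyRange 0 ((l.length : Int) - 1) 1).all fun i =>
        decide (|PySem.List.pyGetD l i 0 - PySem.List.pyGetD l (i + 1) 0| ∈ ([1, 2, 3] : List Int)) then
      true
    else false
  else false

-- the inner `for i in range(len(level))` loop with its break
def tryRemovals (level : List Int) : List Int → Bool
  | [] => false
  | i :: is =>
    let new_list := PySem.List.slice level none (some i) ++ PySem.List.slice level (some (i + 1)) none
    if calculate_validity new_list then true else tryRemovals level is

def trial_removal (levels : List (List Int)) : Int :=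
  levels.foldl (fun valid_levels_count level =>
    if calculate_validity level then valid_levels_count + 1
    else if tryRemovals level (PySem.List.pyRange 0 (level.length : Int) 1) then valid_levels_count + 1
    else valid_levels_count) 0

-- ===== PORT B =====
-- the `for k in range(len(lv)-1)` loop of first_bad with its early return
def firstBadGo (lv : List Int) (lo hi : Int) : List Int → Option Int
  | [] => none
  | k :: ks =>
    if lo ≤ PySem.List.pyGetD lv (k + 1) 0 - PySem.List.pyGetD lv k 0 ∧
       PySem.List.pyGetD lv (k + 1) 0 - PySem.List.pyGetD lv k 0 ≤ hi then
      firstBadGo lv lo hi ks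
    else some k

def first_bad (lv : List Int) (lo hi : Int) : Option Int :=
  firstBadGo lv lo hi (PySem.List.pyRange 0 ((lv.length : Int) - 1) 1)

def fixable (lv : List Int) (lo hi : Int) : Bool :=
  match first_bad lv lo hi with
  | none => true
  | some j =>
    (first_bad (PySem.List.slice lv none (some j) ++ PySem.List.slice lv (some (j + 1)) none) lo hi).isNone
    || (first_bad (PySem.List.slice lv none (some (j + 1)) ++ PySem.List.slice lv (some (j + 2)) none) lo hi).isNone

def trial_removal_alt (levels : List (List Int)) : Int :=
  ((levels.filter fun lv => fixable lv 1 3 || fixable lv (-3) (-1)).map fun _ => (1 : Int)).sum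

-- ===== PRECONDITION & SPEC =====
def Spec_trial_removal (levels : List (List Int)) (out : Int) : Prop := out = trial_removal_alt levels
instance (levels : List (List Int)) (out : Int) : Decidable (Spec_trial_removal levels out) := by unfold Spec_trial_removal; infer_instance

-- ===== CLAIM (what is proved, stated in full; the proofs are below) =====
def Claim_equal_trial_removal : Prop := ∀ (levels : List (List Int)), Dom_trial_removal levels → Spec_trial_removal levels (trial_removal levels)

-- ===== LEMMAS AND PROOFS =====

-- abstract vocabulary the proofs use
def stepOK (lo hi : Int) (l : List Int) (k : Nat) : Bool :=
  decide (lo ≤ l.getD (k + 1) 0 - l.getD k 0 ∧ l.getD (k + 1) 0 - l.getD k 0 ≤ hi)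

def bandN (lo hi : Int) (l : List Int) : Bool := (List.range (l.length - 1)).all (stepOK lo hi l)

def rem (i : Nat) (l : List Int) : List Int := l.take i ++ l.drop (i + 1)

theorem rem_self (l : List Int) : rem l.length l = l := by
  simp [rem]

theorem length_rem (i : Nat) (l : List Int) (h : i < l.length) : (rem i l).length = l.length - 1 := by
  simp [rem]; omega

theorem getD_rem (i k : Nat) (l : List Int) (hi' : i < l.length) (_hk : k < l.length - 1) :
    (rem i l).getD k 0 = if k < i then l.getD k 0 else l.getD (k + 1) 0 := by
  unfold rem
  have ht : (List.take i l).length = i := List.length_take_of_le (le_of_lt hi')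
  by_cases hki : k < i
  · rw [if_pos hki, List.getD_eq_getElem?_getD,
      List.getElem?_append_left (by rw [ht]; exact hki),
      List.getElem?_take_of_lt hki, List.getD_eq_getElem?_getD]
  · have hik : i ≤ k := Nat.le_of_not_lt hki
    rw [if_neg hki, List.getD_eq_getElem?_getD,
      List.getElem?_append_right (by rw [ht]; exact hik),
      List.getElem?_drop]
    have hidx : i + 1 + (k - (List.take i l).length) = k + 1 := by rw [ht]; omega
    rw [hidx, List.getD_eq_getElem?_getD]

-- a Bool `all` over adjacent pairs distributes over &&
theorem all_and_distrib {α : Type} (f g : α → Bool) (l : List α) :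
    (l.all fun x => f x && g x) = (l.all f && l.all g) := by
  induction l with
  | nil => rfl
  | cons x t ih => simp [ih, Bool.and_assoc, Bool.and_left_comm]

-- adjacent-pair `all` over Nat indices equals `all` over zip with the tail
theorem zip_tail_all (p : Int → Int → Bool) : ∀ (l : List Int),
    ((l.zip l.tail).all fun q => p q.1 q.2)
      = (List.range (l.length - 1)).all fun k => p (l.getD k 0) (l.getD (k + 1) 0)
  | [] => rfl
  | [_] => rfl
  | a :: b :: t => by
    have ih := zip_tail_all p (b :: t)
    simp only [List.length_cons, Nat.add_sub_cancel]
    rw [List.range_succ_eq_map]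
    simp only [List.tail_cons, List.zip_cons_cons, List.all_cons, List.all_map,
      Function.comp_def, List.getD_cons_zero, List.getD_cons_succ]
    simp only [List.length_cons, Nat.add_sub_cancel, List.tail_cons, List.getD_cons_succ] at ih
    rw [ih]

-- A's index loop `all(p(l[i], l[i+1]) for i in range(len(l)-1))` as a zip-with-tail `all`
theorem rangeAll_eq_zipAll (p : Int → Int → Bool) (l : List Int) :
    ((PySem.List.pyRange 0 ((l.length : Int) - 1) 1).all fun i =>
        p (PySem.List.pyGetD l i 0) (PySem.List.pyGetD l (i + 1) 0))
      = (l.zip l.tail).all fun q => p q.1 q.2 := by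
  rw [PySem.List.pyRange_one, zip_tail_all]
  simp only [List.all_map, Int.sub_zero, Function.comp_def]
  have hn : (((l.length : Int) - 1)).toNat = l.length - 1 := by omega
  rw [hn]
  congr 1
  funext k
  simp only [zero_add]
  have h2 : (k : Int) + 1 = (((k + 1 : Nat)) : Int) := by push_cast; ring
  rw [h2, PySem.List.pyGetD_natCast, PySem.List.pyGetD_natCast]

theorem band_eq_zip (lo hi : Int) (l : List Int) :
    bandN lo hi l = (l.zip l.tail).all fun q => decide (lo ≤ q.2 - q.1 ∧ q.2 - q.1 ≤ hi) := by
  unfold bandN stepOK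
  rw [zip_tail_all (fun x y => decide (lo ≤ y - x ∧ y - x ≤ hi))]

-- the per-pair arithmetic: a step of 1..3 upward is exactly "increasing and |diff| in {1,2,3}"
theorem step_up (x y : Int) :
    decide (1 ≤ y - x ∧ y - x ≤ 3)
      = (decide (x < y) && decide (|x - y| ∈ ([1, 2, 3] : List Int))) := by
  rw [Bool.eq_iff_iff]
  simp only [Bool.and_eq_true, decide_eq_true_eq, List.mem_cons, List.not_mem_nil, or_false]
  rcases abs_cases (x - y) with ⟨h, _⟩ | ⟨h, _⟩ <;> rw [h] <;> omega

theorem step_down (x y : Int) :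
    decide (-3 ≤ y - x ∧ y - x ≤ -1)
      = (decide (x > y) && decide (|x - y| ∈ ([1, 2, 3] : List Int))) := by
  rw [Bool.eq_iff_iff]
  simp only [Bool.and_eq_true, decide_eq_true_eq, List.mem_cons, List.not_mem_nil, or_false]
  rcases abs_cases (x - y) with ⟨h, _⟩ | ⟨h, _⟩ <;> rw [h] <;> omega

theorem cv_eq_band (l : List Int) :
    calculate_validity l = (bandN 1 3 l || bandN (-3) (-1) l) := by
  unfold calculate_validity
  rw [band_eq_zip, band_eq_zip]
  rw [rangeAll_eq_zipAll (fun x y => decide (x < y)),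
      rangeAll_eq_zipAll (fun x y => decide (x > y)),
      rangeAll_eq_zipAll (fun x y => decide (|x - y| ∈ ([1, 2, 3] : List Int)))]
  have hu : ((l.zip l.tail).all fun q => decide (1 ≤ q.2 - q.1 ∧ q.2 - q.1 ≤ 3))
      = (((l.zip l.tail).all fun q => decide (q.1 < q.2))
         && ((l.zip l.tail).all fun q => decide (|q.1 - q.2| ∈ ([1, 2, 3] : List Int)))) := by
    rw [← all_and_distrib]; congr 1; funext q; exact step_up q.1 q.2
  have hd : ((l.zip l.tail).all fun q => decide (-3 ≤ q.2 - q.1 ∧ q.2 - q.1 ≤ -1))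
      = (((l.zip l.tail).all fun q => decide (q.1 > q.2))
         && ((l.zip l.tail).all fun q => decide (|q.1 - q.2| ∈ ([1, 2, 3] : List Int)))) := by
    rw [← all_and_distrib]; congr 1; funext q; exact step_down q.1 q.2
  rw [hu, hd]
  cases ((l.zip l.tail).all fun q => decide (q.1 < q.2)) <;>
    cases ((l.zip l.tail).all fun q => decide (q.1 > q.2)) <;>
    cases ((l.zip l.tail).all fun q => decide (|q.1 - q.2| ∈ ([1, 2, 3] : List Int))) <;> rfl

-- the B-side scan equals `find?` of the failing index over the Nat range
theorem firstBadGo_map (lv : List Int) (lo hi : Int) (ks : List Nat) :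
    firstBadGo lv lo hi (ks.map (fun k : Nat => (k : Int)))
      = (ks.find? (fun k => !stepOK lo hi lv k)).map (fun k : Nat => (k : Int)) := by
  induction ks with
  | nil => rfl
  | cons k ks ih =>
    rw [List.map_cons]
    simp only [firstBadGo]
    have h1 : ((k : Int) + 1) = (((k + 1 : Nat)) : Int) := by push_cast; ring
    rw [h1, PySem.List.pyGetD_natCast, PySem.List.pyGetD_natCast]
    by_cases h : (lo ≤ lv.getD (k + 1) 0 - lv.getD k 0 ∧ lv.getD (k + 1) 0 - lv.getD k 0 ≤ hi)
    · have hs : (!stepOK lo hi lv k) = false := by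
        unfold stepOK; rw [decide_eq_true h]; rfl
      rw [if_pos h, ih, List.find?_cons_of_neg (by rw [hs]; simp)]
    · have hs : (!stepOK lo hi lv k) = true := by
        unfold stepOK; rw [decide_eq_false h]; rfl
      rw [if_neg h, List.find?_cons_of_pos (p := fun k => !stepOK lo hi lv k) hs]
      simp

theorem first_bad_eq (lv : List Int) (lo hi : Int) :
    first_bad lv lo hi
      = ((List.range (lv.length - 1)).find? (fun k => !stepOK lo hi lv k)).map (fun k : Nat => (k : Int)) := by
  unfold first_bad
  rw [PySem.List.pyRange_one]
  have hn : (((lv.length : Int) - 1 - 0)).toNat = lv.length - 1 := by omega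
  rw [hn]
  have : (List.range (lv.length - 1)).map (fun k : Nat => (0 : Int) + k)
      = (List.range (lv.length - 1)).map (fun k : Nat => (k : Int)) := by
    simp
  rw [this, firstBadGo_map]

theorem find?_range_none_iff (p : Nat → Bool) (n : Nat) :
    (List.range n).find? p = none ↔ ∀ k < n, p k = false := by
  rw [List.find?_eq_none]
  constructor
  · intro h k hk
    have := h k (List.mem_range.mpr hk)
    simpa using this
  · intro h k hk
    simp [h k (List.mem_range.mp hk)]

theorem find?_range_some (p : Nat → Bool) (n j : Nat)
    (h : (List.range n).find? p = some j) :
    j < n ∧ p j = true ∧ ∀ k < j, p k = false := by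
  induction n with
  | zero => simp [List.range_zero] at h
  | succ n ih =>
    rw [List.range_succ, List.find?_append] at h
    cases hfn : (List.range n).find? p with
    | some j' =>
      rw [hfn] at h
      simp at h
      subst h
      obtain ⟨h1, h2, h3⟩ := ih hfn
      exact ⟨by omega, h2, h3⟩
    | none =>
      rw [hfn] at h
      simp only [Option.none_or] at h
      by_cases hp : p n = true
      · rw [List.find?_cons_of_pos hp] at h
        simp at h
        subst h
        refine ⟨by omega, hp, ?_⟩
        intro k hk
        exact (find?_range_none_iff p n).mp hfn k hk
      · rw [List.find?_cons_of_neg (by simp [hp]), List.find?_nil] at h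
        simp at h

theorem bandN_iff (lo hi : Int) (l : List Int) :
    bandN lo hi l = true ↔ ∀ k < l.length - 1, stepOK lo hi l k = true := by
  unfold bandN
  rw [List.all_eq_true]
  constructor
  · intro h k hk; exact h k (List.mem_range.mpr hk)
  · intro h k hk; exact h k (List.mem_range.mp hk)

theorem bandN_false_of_step (lo hi : Int) (l : List Int) (k : Nat)
    (hk : k < l.length - 1) (h : stepOK lo hi l k = false) : bandN lo hi l = false := by
  rw [Bool.eq_false_iff]
  intro hb
  have := (bandN_iff lo hi l).mp hb k hk
  rw [this] at h
  exact Bool.true_eq_false.mp h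

-- only deleting an endpoint of the first out-of-band step can repair the level
theorem bandN_rem_out (lo hi : Int) (l : List Int) (j : Nat)
    (hj : j < l.length - 1) (hbad : stepOK lo hi l j = false)
    (i : Nat) (hi' : i ≤ l.length) (hij : i ≠ j) (hij1 : i ≠ j + 1) :
    bandN lo hi (rem i l) = false := by
  by_cases hilen : i = l.length
  · subst hilen
    rw [rem_self]
    exact bandN_false_of_step lo hi l j hj hbad
  · have hilt : i < l.length := by omega
    have hlen := length_rem i l hilt
    by_cases hlt : i < j
    · -- the bad pair sits at index j-1 of the removed list
      have hj1 : 1 ≤ j := by omega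
      apply bandN_false_of_step lo hi (rem i l) (j - 1)
      · omega
      · unfold stepOK
        rw [getD_rem i (j - 1) l hilt (by omega), getD_rem i ((j - 1) + 1) l hilt (by omega)]
        rw [if_neg (by omega), if_neg (by omega)]
        have e1 : j - 1 + 1 = j := by omega
        rw [e1]
        unfold stepOK at hbad
        exact hbad
    · have hgt : j + 1 < i := by omega
      apply bandN_false_of_step lo hi (rem i l) j
      · omega
      · unfold stepOK
        rw [getD_rem i j l hilt (by omega), getD_rem i (j + 1) l hilt (by omega)]
        rw [if_pos (by omega), if_pos (by omega)]
        unfold stepOK at hbad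
        exact hbad

theorem first_bad_none_iff (lv : List Int) (lo hi : Int) :
    first_bad lv lo hi = none ↔ bandN lo hi lv = true := by
  rw [first_bad_eq, Option.map_eq_none_iff, find?_range_none_iff, bandN_iff]
  constructor
  · intro h k hk
    have := h k hk
    simpa using this
  · intro h k hk
    simp [h k hk]

theorem fixable_iff (lv : List Int) (lo hi : Int) :
    fixable lv lo hi = true ↔ ∃ i, i ≤ lv.length ∧ bandN lo hi (rem i lv) = true := by
  unfold fixable
  cases hfb : first_bad lv lo hi with
  | none =>
    simp only [true_iff]
    exact ⟨lv.length, le_refl _, by rw [rem_self]; exact (first_bad_none_iff lv lo hi).mp hfb⟩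
  | some jI =>
    have := hfb
    rw [first_bad_eq, Option.map_eq_some_iff] at this
    obtain ⟨j, hfind, hjI⟩ := this
    obtain ⟨hjlt, hpj, hmin⟩ := find?_range_some _ _ _ hfind
    have hbad : stepOK lo hi lv j = false := by simpa using hpj
    subst hjI
    show ((first_bad (PySem.List.slice lv none (some ((j : Nat) : Int)) ++ PySem.List.slice lv (some (((j : Nat) : Int) + 1)) none) lo hi).isNone
        || (first_bad (PySem.List.slice lv none (some (((j : Nat) : Int) + 1)) ++ PySem.List.slice lv (some (((j : Nat) : Int) + 2)) none) lo hi).isNone) = true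
        ↔ ∃ i, i ≤ lv.length ∧ bandN lo hi (rem i lv) = true
    have hs1 : PySem.List.slice lv none (some (j : Int)) ++ PySem.List.slice lv (some ((j : Int) + 1)) none
        = rem j lv := by
      have e : ((j : Int) + 1) = (((j + 1 : Nat)) : Int) := by push_cast; ring
      rw [PySem.List.slice_to_natCast, e, PySem.List.slice_from_natCast]
      rfl
    have hs2 : PySem.List.slice lv none (some ((j : Int) + 1)) ++ PySem.List.slice lv (some ((j : Int) + 2)) none
        = rem (j + 1) lv := by
      have e1 : ((j : Int) + 1) = (((j + 1 : Nat)) : Int) := by push_cast; ring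
      have e2 : ((j : Int) + 2) = (((j + 1 + 1 : Nat)) : Int) := by push_cast; ring
      rw [e1, e2, PySem.List.slice_to_natCast, PySem.List.slice_from_natCast]
      rfl
    rw [hs1, hs2]
    rw [Bool.or_eq_true, Option.isNone_iff_eq_none, Option.isNone_iff_eq_none,
        first_bad_none_iff, first_bad_none_iff]
    constructor
    · rintro (h | h)
      · exact ⟨j, by omega, h⟩
      · exact ⟨j + 1, by omega, h⟩
    · rintro ⟨i, hile, hband⟩
      by_cases h1 : i = j
      · subst h1; exact Or.inl hband
      by_cases h2 : i = j + 1
      · subst h2; exact Or.inr hband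
      · exfalso
        have := bandN_rem_out lo hi lv j hjlt hbad i hile h1 h2
        rw [this] at hband
        exact Bool.false_eq_true.mp hband

-- A-side inner loop as an existential over removal indices (i = len means "remove nothing")
theorem tryRemovals_eq_any (level : List Int) (is : List Int) :
    tryRemovals level is = is.any fun i =>
      calculate_validity (PySem.List.slice level none (some i) ++ PySem.List.slice level (some (i + 1)) none) := by
  induction is with
  | nil => rfl
  | cons i is ih => simp [tryRemovals, ih]

theorem AElem_iff (l : List Int) :
    (if calculate_validity l then true
     else tryRemovals l (PySem.List.pyRange 0 (l.length : Int) 1)) = true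
      ↔ ∃ i, i ≤ l.length ∧ (bandN 1 3 (rem i l) || bandN (-3) (-1) (rem i l)) = true := by
  by_cases hc : calculate_validity l = true
  · rw [if_pos hc]
    simp only [true_iff]
    refine ⟨l.length, le_refl _, ?_⟩
    rw [rem_self, ← cv_eq_band]
    exact hc
  · rw [if_neg hc, tryRemovals_eq_any]
    rw [PySem.List.pyRange_one]
    have hn : ((l.length : Int) - 0).toNat = l.length := by omega
    rw [hn, List.any_map, List.any_eq_true]
    constructor
    · rintro ⟨i, hi, hcv⟩
      have hilt := List.mem_range.mp hi
      simp only [Function.comp_def, zero_add] at hcv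
      refine ⟨i, by omega, ?_⟩
      have hs1 : PySem.List.slice l none (some (i : Int)) ++ PySem.List.slice l (some ((i : Int) + 1)) none
          = rem i l := by
        have e : ((i : Int) + 1) = (((i + 1 : Nat)) : Int) := by push_cast; ring
        rw [PySem.List.slice_to_natCast, e, PySem.List.slice_from_natCast]
        rfl
      rw [hs1, cv_eq_band] at hcv
      exact hcv
    · rintro ⟨i, hile, hband⟩
      have hilt : i < l.length := by
        rcases Nat.lt_or_ge i l.length with h | h
        · exact h
        · exfalso
          have : i = l.length := by omega
          subst this
          rw [rem_self, ← cv_eq_band] at hband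
          exact hc hband
      refine ⟨i, List.mem_range.mpr hilt, ?_⟩
      simp only [Function.comp_def, zero_add]
      have hs1 : PySem.List.slice l none (some (i : Int)) ++ PySem.List.slice l (some ((i : Int) + 1)) none
          = rem i l := by
        have e : ((i : Int) + 1) = (((i + 1 : Nat)) : Int) := by push_cast; ring
        rw [PySem.List.slice_to_natCast, e, PySem.List.slice_from_natCast]
        rfl
      rw [hs1, cv_eq_band]
      exact hband

theorem elem_eq (l : List Int) :
    (if calculate_validity l then true
     else tryRemovals l (PySem.List.pyRange 0 (l.length : Int) 1))
      = (fixable l 1 3 || fixable l (-3) (-1)) := by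
  rw [Bool.eq_iff_iff, AElem_iff, Bool.or_eq_true, fixable_iff, fixable_iff]
  constructor
  · rintro ⟨i, hi, hb⟩
    rw [Bool.or_eq_true] at hb
    rcases hb with hb | hb
    · exact Or.inl ⟨i, hi, hb⟩
    · exact Or.inr ⟨i, hi, hb⟩
  · rintro (⟨i, hi, hb⟩ | ⟨i, hi, hb⟩)
    · exact ⟨i, hi, by rw [Bool.or_eq_true]; exact Or.inl hb⟩
    · exact ⟨i, hi, by rw [Bool.or_eq_true]; exact Or.inr hb⟩

-- ===== VERDICT (by name: the statement is the Claim_ definition above) =====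
theorem trial_removal_spec : Claim_equal_trial_removal := by
  unfold Claim_equal_trial_removal
  intro levels _
  unfold Spec_trial_removal trial_removal trial_removal_alt
  have hstep : (fun (acc : Int) (level : List Int) =>
      if calculate_validity level then acc + 1
      else if tryRemovals level (PySem.List.pyRange 0 (level.length : Int) 1) then acc + 1
      else acc) = fun acc level => if (fixable level 1 3 || fixable level (-3) (-1)) then acc + 1 else acc := by
    funext acc level
    rw [← elem_eq level]
    by_cases h : calculate_validity level = true <;> simp [h]
  rw [hstep, PySem.List.foldl_count_if, PySem.List.sum_map_const_int,
    ← List.countP_eq_length_filter]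
  omega
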